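-- pv_equiv track=rewrite | github.com/YunTang1997/My_projects | 编程题/1300. 转变数组后最接近目标值的数组和.py | findBestValue_2
-- ===== SOURCE A (Python) =====
-- import bisect  # 用于[有序序列]的插入和查找
--
-- def findBestValue_2(arr, target):
--     arr.sort()
--     n = len(arr)
--     max_arr = arr[-1]
--     # 注意34~36得到一个序列前缀和的方法，此处求前缀和是为了方便后面求的修改以后的arr数组和
--     prefix_sum = [0]
--     for i in arr:
--         prefix_sum.append(prefix_sum[-1] + i)
--     res, diff = 0, target
--     for i in range(1, max_arr + 1):  # 注意这个循环范围的由来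
--         prev = bisect.bisect_left(arr, i)
--         cur_sum = prefix_sum[prev] + (n - prev) * i
--         if abs(cur_sum - target) < diff:  # 遍历完for循环以后，res肯定是满足条件且最小的，因为i是从小到达遍历的
--             res = i
--             diff = abs(cur_sum - target)
--     return res
-- ===== SOURCE B (Python) =====
-- import bisect
--
-- def findBestValue_2(arr, target):
--     # Same return value as A; like A, sorts arr in place.
--     arr.sort()
--     n = len(arr)
--     max_arr = arr[-1]
--     prefix_sum = [0]
--     for i in arr:
--         prefix_sum.append(prefix_sum[-1] + i)
--
--     def clamp_sum(v):
--         prev = bisect.bisect_left(arr, v)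
--         return prefix_sum[prev] + (n - prev) * v
--
--     # clamp_sum is nondecreasing: binary-search the smallest v in [1, max_arr]
--     # with clamp_sum(v) >= target (lo = max_arr + 1 if there is none) ...
--     lo, hi = 1, max_arr + 1
--     while lo < hi:
--         mid = (lo + hi) // 2
--         if clamp_sum(mid) >= target:
--             hi = mid
--         else:
--             lo = mid + 1
--     # ... then only lo - 1 and lo can beat the baseline (0, target); the smaller
--     # candidate is checked first, which reproduces A's tie-breaking exactly.
--     res, diff = 0, target
--     for v in (lo - 1, lo):
--         if 1 <= v <= max_arr:
--             d = abs(clamp_sum(v) - target)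
--             if d < diff:
--                 res, diff = v, d
--     return res
-- ===== Notes on version B (the rewrite author's own statement) =====
-- stated objective: faster
-- what changed: Instead of scanning every clamp value 1..max(arr) (A's O(max*log n) loop), B binary-searches the nondecreasing clamped sum for the smallest value reaching target and compares only the two neighbouring candidates (smaller first) against the same (0, target) baseline.
import Mathlib
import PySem

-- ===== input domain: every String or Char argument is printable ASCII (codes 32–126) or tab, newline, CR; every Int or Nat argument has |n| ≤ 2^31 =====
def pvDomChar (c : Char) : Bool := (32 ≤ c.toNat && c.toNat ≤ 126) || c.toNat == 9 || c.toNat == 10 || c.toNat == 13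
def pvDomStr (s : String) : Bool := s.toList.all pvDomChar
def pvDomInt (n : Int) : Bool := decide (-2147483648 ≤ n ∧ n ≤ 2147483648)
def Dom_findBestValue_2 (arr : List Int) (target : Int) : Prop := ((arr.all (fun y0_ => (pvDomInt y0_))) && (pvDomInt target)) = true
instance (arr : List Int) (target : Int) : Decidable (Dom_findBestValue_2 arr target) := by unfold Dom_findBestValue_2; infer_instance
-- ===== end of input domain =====

-- B replaces A's scan over every clamp value 1..max(arr) by a binary search on the
-- nondecreasing clamped sum (objective: faster). Like A, B sorts its list argument in
-- place in Python; the equivalence proved here is about the return value.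


-- ===== PORT A =====
def findBestValue_2 (arr : List Int) (target : Int) : Int :=
  let s := PySem.List.sorted arr (fun x => x)
  let n : Int := PySem.List.len s
  let maxArr : Int := PySem.List.pyGetD s (-1) 0   -- arr[-1]; IndexError on [] is excluded by Pre_
  let prefixSum : List Int :=
    s.foldl (fun acc i => acc ++ [PySem.List.pyGetD acc (-1) 0 + i]) [0]
  let out := (PySem.List.pyRange 1 (maxArr + 1)).foldl (fun (st : Int × Int) i =>
      let prev : Int := (PySem.List.bisectLeft s i : Int)
      let curSum := PySem.List.pyGetD prefixSum prev 0 + (n - prev) * i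
      if |curSum - target| < st.2 then (i, |curSum - target|) else st) (0, target)
  out.1

-- ===== PORT B =====
-- clamp_sum(v) of Source B
def pvClampSum (s prefixSum : List Int) (n v : Int) : Int :=
  let prev : Int := (PySem.List.bisectLeft s v : Int)
  PySem.List.pyGetD prefixSum prev 0 + (n - prev) * v

-- the `while lo < hi` binary-search loop of Source B; lo and hi stay nonnegative at every
-- call site, so Lean's `/` agrees with Python's floor `//` on the midpoint
def pvBSearch (s prefixSum : List Int) (n target lo hi : Int) : Int :=
  if h : lo < hi then
    let mid := (lo + hi) / 2
    if target ≤ pvClampSum s prefixSum n mid then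
      pvBSearch s prefixSum n target lo mid
    else
      pvBSearch s prefixSum n target (mid + 1) hi
  else lo
termination_by (hi - lo).toNat
decreasing_by
  · have h2 : (lo + hi) / 2 < hi := by omega
    omega
  · have h1 : lo ≤ (lo + hi) / 2 := by omega
    omega

def findBestValue_2_alt (arr : List Int) (target : Int) : Int :=
  let s := PySem.List.sorted arr (fun x => x)
  let n : Int := PySem.List.len s
  let maxArr : Int := PySem.List.pyGetD s (-1) 0
  let prefixSum : List Int :=
    s.foldl (fun acc i => acc ++ [PySem.List.pyGetD acc (-1) 0 + i]) [0]
  let lo := pvBSearch s prefixSum n target 1 (maxArr + 1)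
  let out := [lo - 1, lo].foldl (fun (st : Int × Int) v =>
      if 1 ≤ v ∧ v ≤ maxArr then
        let d := |pvClampSum s prefixSum n v - target|
        if d < st.2 then (v, d) else st
      else st) (0, target)
  out.1

-- ===== PRECONDITION & SPEC =====
-- A evaluates arr[-1]: it raises IndexError exactly on the empty list, so Pre_ excludes it.
def Pre_findBestValue_2 (arr : List Int) (target : Int) : Prop := arr ≠ []
instance (arr : List Int) (target : Int) : Decidable (Pre_findBestValue_2 arr target) := by
  unfold Pre_findBestValue_2; infer_instance
def pvWitness_findBestValue_2 : List Int × Int := ([2, 5, 1], 6)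

def Spec_findBestValue_2 (arr : List Int) (target : Int) (out : Int) : Prop := out = findBestValue_2_alt arr target
instance (arr : List Int) (target : Int) (out : Int) : Decidable (Spec_findBestValue_2 arr target out) := by unfold Spec_findBestValue_2; infer_instance

-- ===== CLAIM (what is proved, stated in full; the proofs are below) =====
def Claim_equal_findBestValue_2 : Prop := ∀ (arr : List Int) (target : Int), Dom_findBestValue_2 arr target → Pre_findBestValue_2 arr target → Spec_findBestValue_2 arr target (findBestValue_2 arr target)

-- ===== LEMMAS AND PROOFS =====

-- the prefix-sum list both programs build: a leading c followed by running sums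
def pvRef (c : Int) : List Int → List Int
  | [] => [c]
  | a :: t => c :: pvRef (c + a) t

lemma pvRef_foldl : ∀ (l pre : List Int) (c : Int),
    l.foldl (fun acc i => acc ++ [PySem.List.pyGetD acc (-1) 0 + i]) (pre ++ [c])
      = pre ++ pvRef c l := by
  intro l
  induction l with
  | nil => intro pre c; simp [pvRef]
  | cons a t ih =>
    intro pre c
    simp only [List.foldl_cons, PySem.List.pyGetD_neg_one_append_singleton]
    rw [show (pre ++ [c]) ++ [c + a] = (pre ++ [c]) ++ [c + a] from rfl,
        ih (pre ++ [c]) (c + a)]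
    simp [pvRef]

lemma pvRef_getD : ∀ (l : List Int) (c : Int) (k : Nat), k ≤ l.length →
    (pvRef c l).getD k 0 = c + (l.take k).sum := by
  intro l
  induction l with
  | nil =>
    intro c k hk
    have h0 : k = 0 := by simpa using hk
    subst h0; simp [pvRef]
  | cons a t ih =>
    intro c k hk
    cases k with
    | zero => simp [pvRef]
    | succ k =>
      simp only [pvRef, List.getD_cons_succ, List.take_succ_cons, List.sum_cons]
      rw [ih (c + a) k (by simpa using hk)]
      ring

-- sum of the array clamped at v — order independent reading of cur_sum
def pvF (s : List Int) (v : Int) : Int := (s.map (fun a => min a v)).sum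

lemma pvClamp_eq (s : List Int) (hpw : s.Pairwise fun a b => a ≤ b) (v : Int) :
    pvClampSum s (s.foldl (fun acc i => acc ++ [PySem.List.pyGetD acc (-1) 0 + i]) [0])
      (PySem.List.len s) v = pvF s v := by
  obtain ⟨hle, hlt, hge⟩ := PySem.List.bisectLeft_spec s v hpw
  set p := PySem.List.bisectLeft s v with hp
  have hpf : s.foldl (fun acc i => acc ++ [PySem.List.pyGetD acc (-1) 0 + i]) [0]
      = pvRef 0 s := by simpa using pvRef_foldl s [] 0
  have htake : (s.take p).map (fun a => min a v) = s.take p := by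
    have h1 : ∀ a ∈ s.take p, min a v = a := by
      intro a ha
      obtain ⟨i, hi, hia⟩ := List.mem_iff_getElem.1 ha
      have hip : i < p := by have := hi; simp [List.length_take] at this; omega
      have hlen : i < s.length := by have := hi; simp [List.length_take] at this; omega
      have : s[i] < v := hlt i hlen hip
      rw [← hia, List.getElem_take]
      exact min_eq_left (le_of_lt this)
    calc (s.take p).map (fun a => min a v) = (s.take p).map id := List.map_congr_left h1
      _ = s.take p := List.map_id _
  have hdrop : (s.drop p).map (fun a => min a v) = (s.drop p).map (fun _ => v) := by
    apply List.map_congr_left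
    intro a ha
    obtain ⟨i, hi, hia⟩ := List.mem_iff_getElem.1 ha
    have hlen : p + i < s.length := by have := hi; simp [List.length_drop] at this; omega
    have : v ≤ s[p + i] := hge (p + i) hlen (by omega)
    rw [← hia, List.getElem_drop]
    exact min_eq_right this
  have hsum : pvF s v = (s.take p).sum + ((s.drop p).length : Int) * v := by
    conv_lhs => rw [pvF, ← List.take_append_drop p s]
    rw [List.map_append, List.sum_append, htake, hdrop, PySem.List.sum_map_const_int]
  unfold pvClampSum
  rw [hpf]
  show PySem.List.pyGetD (pvRef 0 s) (p : Int) 0 + (PySem.List.len s - (p : Int)) * v = pvF s v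
  rw [PySem.List.pyGetD_natCast, pvRef_getD s 0 p hle, PySem.List.len_eq, hsum]
  have : ((s.drop p).length : Int) = (s.length : Int) - (p : Int) := by
    rw [List.length_drop]; omega
  rw [this]; ring

lemma pvF_mono (s : List Int) {v w : Int} (h : v ≤ w) : pvF s v ≤ pvF s w :=
  List.sum_le_sum (fun a _ => min_le_min (le_refl a) h)

lemma pvF_strict (s : List Int) {v w a : Int} (hvw : v < w) (haw : w ≤ a) (ha : a ∈ s) :
    pvF s v < pvF s w := by
  induction ha with
  | head t =>
    have h2 := pvF_mono t (le_of_lt hvw)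
    have h3 : min a v ≤ v := min_le_right _ _
    have h4 : min a w = w := min_eq_right haw
    simp only [pvF, List.map_cons, List.sum_cons] at *
    omega
  | tail x hmem ih =>
    have hx : min x v ≤ min x w := min_le_min (le_refl x) (le_of_lt hvw)
    simp only [pvF, List.map_cons, List.sum_cons] at *
    omega

lemma pvBSearch_spec (s pf : List Int) (n target : Int) :
    ∀ (k : Nat) (lo hi : Int), (hi - lo).toNat ≤ k → lo ≤ hi →
      lo ≤ pvBSearch s pf n target lo hi ∧ pvBSearch s pf n target lo hi ≤ hi ∧
      (lo < pvBSearch s pf n target lo hi →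
        pvClampSum s pf n (pvBSearch s pf n target lo hi - 1) < target) ∧
      (pvBSearch s pf n target lo hi < hi →
        target ≤ pvClampSum s pf n (pvBSearch s pf n target lo hi)) := by
  intro k
  induction k with
  | zero =>
    intro lo hi hk hle
    have h : ¬ lo < hi := by omega
    rw [pvBSearch, dif_neg h]
    exact ⟨le_refl _, hle, by omega, by omega⟩
  | succ k ih =>
    intro lo hi hk hle
    by_cases h : lo < hi
    · rw [pvBSearch, dif_pos h]
      have hm1 : lo ≤ (lo + hi) / 2 := by omega
      have hm2 : (lo + hi) / 2 < hi := by omega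
      by_cases hc : target ≤ pvClampSum s pf n ((lo + hi) / 2)
      · simp only [if_pos hc]
        obtain ⟨a1, a2, a3, a4⟩ := ih lo ((lo + hi) / 2) (by omega) (by omega)
        refine ⟨a1, by omega, a3, ?_⟩
        intro hlt
        rcases lt_or_eq_of_le a2 with hx | hx
        · exact a4 hx
        · rw [hx]; exact hc
      · simp only [if_neg hc]
        obtain ⟨a1, a2, a3, a4⟩ := ih ((lo + hi) / 2 + 1) hi (by omega) (by omega)
        refine ⟨by omega, a2, ?_, a4⟩
        intro hlt
        rcases lt_or_eq_of_le a1 with hx | hx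
        · exact a3 hx
        · rw [← hx]
          simpa using not_le.1 hc
    · rw [pvBSearch, dif_neg h]
      exact ⟨le_refl _, hle, by omega, by omega⟩

lemma pvFoldMin_noup (g : Int → Int) : ∀ (l : List Int) (st : Int × Int),
    (∀ v ∈ l, st.2 ≤ g v) →
    l.foldl (fun st i => if g i < st.2 then (i, g i) else st) st = st := by
  intro l
  induction l with
  | nil => intro st _; rfl
  | cons a t ih =>
    intro st h
    simp only [List.foldl_cons]
    rw [if_neg (not_lt.2 (h a (List.mem_cons_self)))]
    exact ih st (fun v hv => h v (List.mem_cons_of_mem _ hv))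

lemma pvFoldMin_dec (g : Int → Int) (t0 : Int) : ∀ (k : Nat) (a b : Int),
    (b - a).toNat ≤ k → a ≤ b →
    (∀ v w, a ≤ v → v < w → w < b → g w < g v) →
    (PySem.List.pyRange a b).foldl (fun st i => if g i < st.2 then (i, g i) else st) ((0 : Int), t0)
      = if a < b ∧ g (b - 1) < t0 then (b - 1, g (b - 1)) else (0, t0) := by
  intro k
  induction k with
  | zero =>
    intro a b hk hab hdec
    have hba : b ≤ a := by omega
    rw [PySem.List.pyRange_one_eq_nil hba, List.foldl_nil,
        if_neg (fun hcon => absurd hcon.1 (by omega))]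
  | succ k ih =>
    intro a b hk hab hdec
    rcases eq_or_lt_of_le hab with rfl | hlt
    · rw [PySem.List.pyRange_one_eq_nil (le_refl a), List.foldl_nil,
          if_neg (fun hcon => absurd hcon.1 (by omega))]
    · have hb : a ≤ b - 1 := by omega
      have hsplit : PySem.List.pyRange a b = PySem.List.pyRange a (b - 1) ++ [b - 1] := by
        have h2 := PySem.List.pyRange_one_succ_right hb (a := a) (b := b - 1)
        rwa [show b - 1 + 1 = b by ring] at h2
      rw [hsplit, List.foldl_append,
          ih a (b - 1) (by omega) hb (fun v w h1 h2 h3 => hdec v w h1 h2 (by omega)),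
          List.foldl_cons, List.foldl_nil]
      by_cases hC : a < b - 1 ∧ g (b - 1 - 1) < t0
      · rw [if_pos hC]
        dsimp only
        have hgg : g (b - 1) < g (b - 1 - 1) :=
          hdec (b - 1 - 1) (b - 1) (by omega) (by omega) (by omega)
        rw [if_pos hgg, if_pos ⟨hlt, by omega⟩]
      · rw [if_neg hC]
        dsimp only
        by_cases h1 : g (b - 1) < t0
        · rw [if_pos h1, if_pos ⟨hlt, h1⟩]
        · rw [if_neg h1, if_neg (fun hcon => h1 hcon.2)]

theorem pvMain (arr : List Int) (target : Int) (hne : arr ≠ []) :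
    findBestValue_2 arr target = findBestValue_2_alt arr target := by
  have hperm := PySem.List.sorted_perm arr (fun x => x) false
  have hsne : PySem.List.sorted arr (fun x => x) ≠ [] := by
    intro h
    rw [h] at hperm
    exact hne hperm.nil_eq.symm
  unfold findBestValue_2 findBestValue_2_alt
  dsimp only
  set s := PySem.List.sorted arr (fun x => x) with hs
  have hpw : s.Pairwise fun a b => a ≤ b := by
    simpa using PySem.List.sorted_pairwise arr (fun x => x)
  set pf := s.foldl (fun acc i => acc ++ [PySem.List.pyGetD acc (-1) 0 + i]) [0] with hpfdef
  set M := PySem.List.pyGetD s (-1) 0 with hMdef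
  have hMlast : M = s.getLast hsne := by
    rw [hMdef]; exact PySem.List.pyGetD_neg_one s 0 hsne
  have hMmem : M ∈ s := by rw [hMlast]; exact List.getLast_mem hsne
  have hclamp : ∀ v, pvClampSum s pf (PySem.List.len s) v = pvF s v := by
    intro v; rw [hpfdef]; exact pvClamp_eq s hpw v
  have hinline : ∀ v : Int,
      PySem.List.pyGetD pf ((PySem.List.bisectLeft s v : Nat) : Int) 0
        + (PySem.List.len s - ((PySem.List.bisectLeft s v : Nat) : Int)) * v = pvF s v := by
    intro v
    have h := hclamp v
    simpa [pvClampSum] using h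
  by_cases hM : 1 ≤ M
  · -- main case: there is at least one candidate clamp value
    set r := pvBSearch s pf (PySem.List.len s) target 1 (M + 1) with hrdef
    obtain ⟨h1r, hrM, hL0, hR0⟩ :=
      pvBSearch_spec s pf (PySem.List.len s) target (M + 1 - 1).toNat 1 (M + 1)
        (by omega) (by omega)
    rw [← hrdef] at h1r hrM hL0 hR0
    have hL : 1 < r → pvF s (r - 1) < target := by
      intro h; have h2 := hL0 h; rwa [hclamp] at h2
    have hR : r < M + 1 → target ≤ pvF s r := by
      intro h; have h2 := hR0 h; rwa [hclamp] at h2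
    have hstr : ∀ v w : Int, v < w → w ≤ M → pvF s v < pvF s w :=
      fun v w h1 h2 => pvF_strict s h1 h2 hMmem
    simp only [pvClampSum]
    simp only [hinline]
    rw [PySem.List.pyRange_one_append 1 r (M + 1) (by omega) (by omega), List.foldl_append]
    have hdecEq := pvFoldMin_dec (fun i : Int => |pvF s i - target|) target (r - 1).toNat 1 r
      (by omega) (by omega)
      (by
        intro v w h1 h2 h3
        have hfw : pvF s w < target := by
          have h4 : pvF s w ≤ pvF s (r - 1) := pvF_mono s (by omega)
          have h5 := hL (by omega)
          omega
        have hfv : pvF s v < pvF s w := hstr v w h2 (by omega)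
        dsimp only
        rw [abs_of_nonpos (by omega), abs_of_nonpos (by omega)]
        omega)
    simp only [] at hdecEq
    rw [hdecEq]
    set L := (if 1 < r ∧ |pvF s (r - 1) - target| < target
        then (r - 1, |pvF s (r - 1) - target|) else ((0 : Int), target)) with hLdef
    have hnoup : ∀ st : Int × Int, st.2 ≤ |pvF s r - target| → r ≤ M →
        (PySem.List.pyRange (r + 1) (M + 1)).foldl
          (fun st i => if |pvF s i - target| < st.2 then (i, |pvF s i - target|) else st) st
          = st := by
      intro st hst hrM2
      apply pvFoldMin_noup
      intro v hv
      rw [PySem.List.mem_pyRange_one] at hv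
      have h6 : target ≤ pvF s r := hR (by omega)
      have h7 : pvF s r ≤ pvF s v := pvF_mono s (by omega)
      have h8 : |pvF s v - target| = pvF s v - target := abs_of_nonneg (by omega)
      have h9 : |pvF s r - target| = pvF s r - target := abs_of_nonneg (by omega)
      omega
    by_cases hrM2 : r ≤ M
    · rw [PySem.List.pyRange_one_cons (by omega : r < M + 1), List.foldl_cons]
      simp only [List.foldl_cons, List.foldl_nil]
      rw [hnoup (if |pvF s r - target| < L.2 then (r, |pvF s r - target|) else L)
          (by
            by_cases hC4 : |pvF s r - target| < L.2
            · rw [if_pos hC4]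
            · rw [if_neg hC4]; omega) hrM2]
      rw [if_pos (⟨by omega, hrM2⟩ : (1 : Int) ≤ r ∧ r ≤ M)]
      have hB1 : (if (1 : Int) ≤ r - 1 ∧ r - 1 ≤ M
          then (if |pvF s (r - 1) - target| < ((0 : Int), target).2
            then (r - 1, |pvF s (r - 1) - target|) else ((0 : Int), target))
          else ((0 : Int), target)) = L := by
        rw [hLdef]
        by_cases h1 : 1 < r
        · rw [if_pos (⟨by omega, by omega⟩ : (1 : Int) ≤ r - 1 ∧ r - 1 ≤ M)]
          by_cases h2 : |pvF s (r - 1) - target| < target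
          · rw [if_pos (by simpa using h2), if_pos ⟨h1, h2⟩]
          · rw [if_neg (by simpa using h2), if_neg (fun hc => h2 hc.2)]
        · rw [if_neg (by omega : ¬ ((1 : Int) ≤ r - 1 ∧ r - 1 ≤ M)),
              if_neg (fun hc => h1 hc.1)]
      rw [hB1]
    · -- r = M + 1 : no value reaches target, only r - 1 = M is a candidate
      rw [PySem.List.pyRange_one_eq_nil (by omega), List.foldl_nil]
      simp only [List.foldl_cons, List.foldl_nil]
      rw [if_pos (⟨by omega, by omega⟩ : (1 : Int) ≤ r - 1 ∧ r - 1 ≤ M)]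
      rw [if_neg (fun hc => hrM2 hc.2)]
      rw [hLdef]
      by_cases h2 : |pvF s (r - 1) - target| < target
      · rw [if_pos ⟨by omega, h2⟩, if_pos (by simpa using h2)]
      · rw [if_neg (fun hc => h2 hc.2), if_neg (by simpa using h2)]
  · -- max(arr) < 1 : the scan is empty and no candidate passes B's guard
    have hrange : PySem.List.pyRange 1 (M + 1) = [] := PySem.List.pyRange_one_eq_nil (by omega)
    have hr : pvBSearch s pf (PySem.List.len s) target 1 (M + 1) = 1 := by
      rw [pvBSearch, dif_neg (by omega : ¬ (1 : Int) < M + 1)]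
    rw [hrange, hr]
    simp only [List.foldl_nil, List.foldl_cons]
    rw [if_neg (by omega : ¬ ((1 : Int) ≤ 1 - 1 ∧ 1 - 1 ≤ M)),
        if_neg (by omega : ¬ ((1 : Int) ≤ 1 ∧ 1 ≤ M))]

-- ===== VERDICT (by name: the statement is the Claim_ definition above) =====
theorem findBestValue_2_spec : Claim_equal_findBestValue_2 := by
  intro arr target _ hpre
  unfold Spec_findBestValue_2
  exact pvMain arr target hpre
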